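-- pv_equiv track=rewrite | github.com/partrita/ANARCII | src/anarcii/inference/inference_utils.py | build_inward_list
-- ===== SOURCE A (Python) =====
-- alphabet = [
--     "A",
--     "B",
--     "C",
--     "D",
--     "E",
--     "F",
--     "G",
--     "H",
--     "I",
--     "J",
--     "K",
--     "L",
--     "M",
--     "N",
--     "O",
--     "P",
--     "Q",
--     "R",
--     "S",
--     "T",
--     "U",
--     "V",
--     "W",
--     "X",
--     "Y",
--     "Z",
--     "AA",
--     "BB",
--     "CC",
--     "DD",
--     "EE",
--     "FF",
--     "GG",
--     "HH",
--     "II",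
--     "JJ",
--     "KK",
--     "LL",
--     "MM",
--     "NN",
--     "OO",
--     "PP",
--     "QQ",
--     "RR",
--     "SS",
--     "TT",
--     "UU",
--     "VV",
--     "WW",
--     "XX",
--     "YY",
--     "ZZ",
--     " ",
-- ]
--
-- def build_inward_list(length, start_num, end_num):
--     cdrs = list(range(27, 38)) + list(range(56, 65)) + list(range(105, 117))
--
--     result = []
--     if int(start_num) in cdrs:
--         # Calculate midpoint
--         midpoint = length // 2  # Find the middle index by floor division
--         # 5 becomes 2 ensures that we start at the higher number if uneven
--         for i in range(midpoint):
--             result.append((int(start_num), alphabet[i % len(alphabet)]))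
--         for i in range(midpoint, length):
--             if length % 2 != 0:  # odd
--                 result.append(
--                     (int(end_num), alphabet[(midpoint * 2 - i) % len(alphabet)])
--                 )
--             elif length % 2 == 0:  # even
--                 result.append(
--                     (int(end_num), alphabet[(midpoint * 2 - (i + 1)) % len(alphabet)])
--                 )
--         return result
--
--     else:
--         for i in range(length):
--             result.append((int(start_num), alphabet[i % len(alphabet)]))
--         return result
-- ===== SOURCE B (Python) =====
-- alphabet = [
--     "A", "B", "C", "D", "E", "F", "G", "H", "I", "J", "K", "L", "M",
--     "N", "O", "P", "Q", "R", "S", "T", "U", "V", "W", "X", "Y", "Z",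
--     "AA", "BB", "CC", "DD", "EE", "FF", "GG", "HH", "II", "JJ", "KK", "LL", "MM",
--     "NN", "OO", "PP", "QQ", "RR", "SS", "TT", "UU", "VV", "WW", "XX", "YY", "ZZ",
--     " ",
-- ]
--
--
-- def build_inward_list(length, start_num, end_num):
--     cdrs = list(range(27, 38)) + list(range(56, 65)) + list(range(105, 117))
--     s, e = int(start_num), int(end_num)
--     if s not in cdrs:
--         return [(s, alphabet[i % len(alphabet)]) for i in range(length)]
--     # two-pointer inward build: consume the slots from both ends at once,
--     # giving the front and the back slot at depth k the same letter k;
--     # no midpoint computation and no parity branch are needed.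
--     front, back = [], []
--     n, k = length, 0
--     while n > 1:
--         front.append((s, alphabet[k % len(alphabet)]))
--         back.append((e, alphabet[k % len(alphabet)]))
--         n -= 2
--         k += 1
--     if n == 1:  # one middle slot left: it belongs to the end number
--         back.append((e, alphabet[k % len(alphabet)]))
--     return front + back[::-1]
-- ===== Notes on version B (the rewrite author's own statement) =====
-- stated objective: alternative
-- what changed: The CDR branch is rebuilt as a two-pointer inward construction: one loop consumes a front and a back slot per iteration (same letter for both ends), accumulating two lists that are joined at the end; A's midpoint computation, its parity branch and its mirrored index arithmetic all disappear.
import Mathlib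
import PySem

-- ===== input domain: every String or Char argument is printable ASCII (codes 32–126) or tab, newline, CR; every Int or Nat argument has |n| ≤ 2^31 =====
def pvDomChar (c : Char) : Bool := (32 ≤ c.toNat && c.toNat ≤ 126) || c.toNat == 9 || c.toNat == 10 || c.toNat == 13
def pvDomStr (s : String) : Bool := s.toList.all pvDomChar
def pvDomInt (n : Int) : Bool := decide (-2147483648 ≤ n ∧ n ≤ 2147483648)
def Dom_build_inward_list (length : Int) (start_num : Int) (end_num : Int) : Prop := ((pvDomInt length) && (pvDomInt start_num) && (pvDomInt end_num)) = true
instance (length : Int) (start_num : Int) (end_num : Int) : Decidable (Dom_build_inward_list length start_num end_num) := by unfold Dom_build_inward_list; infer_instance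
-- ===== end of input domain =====

-- B rebuilds the CDR branch as a two-pointer inward construction (one loop consuming a front
-- and a back slot per step), removing A's midpoint and parity arithmetic (objective: alternative).

-- shared module-level constant `alphabet`
def pvAlphabet : List String :=
  ["A", "B", "C", "D", "E", "F", "G", "H", "I", "J", "K", "L", "M",
   "N", "O", "P", "Q", "R", "S", "T", "U", "V", "W", "X", "Y", "Z",
   "AA", "BB", "CC", "DD", "EE", "FF", "GG", "HH", "II", "JJ", "KK", "LL", "MM",
   "NN", "OO", "PP", "QQ", "RR", "SS", "TT", "UU", "VV", "WW", "XX", "YY", "ZZ",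
   " "]

-- alphabet[k % len(alphabet)]  (the index is always in range, so the default is never used)
def pvLetter (k : Int) : String := PySem.List.pyGetD pvAlphabet (PySem.Int.mod k 53) ""

-- ===== PORT A =====
def build_inward_list (length : Int) (start_num : Int) (end_num : Int) : List (Int × String) :=
  let cdrs := PySem.List.pyRange 27 38 1 ++ PySem.List.pyRange 56 65 1 ++ PySem.List.pyRange 105 117 1
  if cdrs.contains start_num then
    let midpoint := PySem.Int.floordiv length 2
    let r1 := (PySem.List.pyRange 0 midpoint 1).map (fun i => (start_num, pvLetter i))
    let r2 := (PySem.List.pyRange midpoint length 1).map (fun i =>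
      if PySem.Int.mod length 2 ≠ 0 then (end_num, pvLetter (midpoint * 2 - i))
      else (end_num, pvLetter (midpoint * 2 - (i + 1))))
    r1 ++ r2
  else
    (PySem.List.pyRange 0 length 1).map (fun i => (start_num, pvLetter i))

-- ===== PORT B =====
-- the `while n > 1` loop of Source B (plus its trailing `if n == 1`): the (front, back)
-- accumulators it produces from remaining-slot count n and letter index k
def pvInwardLoop (s e : Int) (n k : Int) : List (Int × String) × List (Int × String) :=
  if n > 1 then
    let (f, b) := pvInwardLoop s e (n - 2) (k + 1)
    ((s, pvLetter k) :: f, (e, pvLetter k) :: b)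
  else if n = 1 then ([], [(e, pvLetter k)])
  else ([], [])
termination_by n.toNat
decreasing_by omega

def build_inward_list_alt (length : Int) (start_num : Int) (end_num : Int) : List (Int × String) :=
  let cdrs := PySem.List.pyRange 27 38 1 ++ PySem.List.pyRange 56 65 1 ++ PySem.List.pyRange 105 117 1
  if ¬ cdrs.contains start_num then
    (PySem.List.pyRange 0 length 1).map (fun i => (start_num, pvLetter i))
  else
    let fb := pvInwardLoop start_num end_num length 0
    fb.1 ++ fb.2.reverse

-- ===== PRECONDITION & SPEC =====
def Spec_build_inward_list (length : Int) (start_num : Int) (end_num : Int) (out : List (Int × String)) : Prop := out = build_inward_list_alt length start_num end_num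
instance (length : Int) (start_num : Int) (end_num : Int) (out : List (Int × String)) : Decidable (Spec_build_inward_list length start_num end_num out) := by unfold Spec_build_inward_list; infer_instance

-- ===== CLAIM (what is proved, stated in full; the proofs are below) =====
def Claim_equal_build_inward_list : Prop := ∀ (length : Int) (start_num : Int) (end_num : Int), Dom_build_inward_list length start_num end_num → Spec_build_inward_list length start_num end_num (build_inward_list length start_num end_num)

-- ===== LEMMAS AND PROOFS =====

-- closed characterisation of the inward loop: front holds letters k … k+⌊n/2⌋-1,
-- back holds (ascending, before the final reversal) letters k … k+(n-⌊n/2⌋)-1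
theorem pvInwardLoop_eq (s e : Int) : ∀ (m : Nat) (n k : Int), n.toNat = m →
    pvInwardLoop s e n k =
      ((PySem.List.pyRange k (k + PySem.Int.floordiv n 2) 1).map (fun i => (s, pvLetter i)),
       (PySem.List.pyRange k (k + (n - PySem.Int.floordiv n 2)) 1).map (fun i => (e, pvLetter i))) := by
  intro m
  induction m using Nat.strong_induction_on with
  | _ m ih =>
    intro n k hm
    rw [pvInwardLoop]
    have h2 : PySem.Int.floordiv n 2 = n / 2 := PySem.Int.floordiv_eq_ediv_of_pos (by omega)
    by_cases h : n > 1
    · rw [if_pos h]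
      rw [ih (n - 2).toNat (by omega) (n - 2) (k + 1) rfl]
      have h2' : PySem.Int.floordiv (n - 2) 2 = (n - 2) / 2 :=
        PySem.Int.floordiv_eq_ediv_of_pos (by omega)
      have hf : k + 1 + PySem.Int.floordiv (n - 2) 2 = k + PySem.Int.floordiv n 2 := by
        rw [h2, h2']; omega
      have hb : k + 1 + (n - 2 - PySem.Int.floordiv (n - 2) 2) =
          k + (n - PySem.Int.floordiv n 2) := by
        rw [h2, h2']; omega
      rw [hf, hb,
        PySem.List.pyRange_one_cons (a := k) (b := k + PySem.Int.floordiv n 2) (by rw [h2]; omega),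
        PySem.List.pyRange_one_cons (a := k) (b := k + (n - PySem.Int.floordiv n 2))
          (by rw [h2]; omega)]
      simp
    · rw [if_neg h]
      by_cases h1 : n = 1
      · rw [if_pos h1]
        subst h1
        rw [PySem.List.pyRange_one_eq_nil (by rw [h2]; omega),
          show k + (1 - PySem.Int.floordiv 1 2) = k + 1 by rw [h2]; omega,
          PySem.List.pyRange_one_singleton]
        simp
      · rw [if_neg h1]
        rw [PySem.List.pyRange_one_eq_nil (by rw [h2]; omega),
          PySem.List.pyRange_one_eq_nil (by rw [h2]; omega)]
        simp

-- A's parity-split mirrored tail equals the descending letters length-mid-1 … 0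
theorem pv_tail_eq (length end_num : Int) :
    (PySem.List.pyRange (PySem.Int.floordiv length 2) length 1).map (fun i =>
      if PySem.Int.mod length 2 ≠ 0 then (end_num, pvLetter (PySem.Int.floordiv length 2 * 2 - i))
      else (end_num, pvLetter (PySem.Int.floordiv length 2 * 2 - (i + 1))))
    = (PySem.List.pyRange (length - PySem.Int.floordiv length 2 - 1) (-1) (-1)).map
        (fun j => (end_num, pvLetter j)) := by
  have hdm := PySem.Int.floordiv_mul_add_mod length 2
  have hmod : PySem.Int.mod length 2 = 0 ∨ PySem.Int.mod length 2 = 1 := by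
    have := PySem.Int.mod_two_eq length
    tauto
  rw [PySem.List.pyRange_one, PySem.List.pyRange_neg_one]
  have hlen : (length - PySem.Int.floordiv length 2 - 1 - (-1)).toNat
      = (length - PySem.Int.floordiv length 2).toNat := by omega
  rw [hlen, List.map_map, List.map_map]
  apply List.map_congr_left
  intro k _
  simp only [Function.comp]
  rcases hmod with h | h
  · rw [if_neg (by simp; omega)]
    have : PySem.Int.floordiv length 2 * 2 - (PySem.Int.floordiv length 2 + (k : Int) + 1)
        = length - PySem.Int.floordiv length 2 - 1 - (k : Int) := by omega
    rw [this]
  · rw [if_pos (by simp; omega)]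
    have : PySem.Int.floordiv length 2 * 2 - (PySem.Int.floordiv length 2 + (k : Int))
        = length - PySem.Int.floordiv length 2 - 1 - (k : Int) := by omega
    rw [this]

-- descending map = reverse of the ascending map (for the back half)
theorem pv_rev_eq (end_num t : Int) :
    ((PySem.List.pyRange 0 t 1).map (fun i => (end_num, pvLetter i))).reverse
      = (PySem.List.pyRange (t - 1) (-1) (-1)).map (fun j => (end_num, pvLetter j)) := by
  rw [show PySem.List.pyRange (t - 1) (-1) (-1)
        = (PySem.List.pyRange 0 t 1).reverse by
      rw [PySem.List.pyRange_neg_one_eq_reverse]; norm_num,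
    List.map_reverse]

-- ===== VERDICT (by name: the statement is the Claim_ definition above) =====
theorem build_inward_list_spec : Claim_equal_build_inward_list := by
  intro length start_num end_num _
  unfold Spec_build_inward_list build_inward_list build_inward_list_alt
  simp only []
  by_cases hc : (PySem.List.pyRange 27 38 1 ++ PySem.List.pyRange 56 65 1 ++
      PySem.List.pyRange 105 117 1).contains start_num
  · rw [if_pos hc, if_neg (fun h => h hc)]
    rw [pvInwardLoop_eq start_num end_num length.toNat length 0 rfl]
    simp only [zero_add]
    rw [pv_tail_eq, pv_rev_eq]
  · rw [if_neg hc, if_pos hc]
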